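-- pv_equiv track=rewrite | github.com/nityabharti/ADA_and_Python_lab | Lab-01_Palindrome.py | get_unique_palindromes
-- ===== SOURCE A (Python) =====
-- def expand(s, left, right):
--     len_s = len(s)
--     while left >= 0 and right < len_s and s[left] == s[right]:
--         left -= 1
--         right += 1
--     return left+1, right-1
--
-- def get_unique_palindromes(s):
--     len_s = len(s)
--     result = []
--     for i in range(len_s):
--         l1, r1 = expand(s, i, i)
--         l2, r2 = expand(s, i, i+1)
--
--         if l1 != r1:
--             result.append(s[l1:r1+1])
--         if l2 < r2:
--             result.append(s[l2:r2+1])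
--     return result
-- ===== SOURCE B (Python) =====
-- # Single pass over the 2n-1 palindrome centers; each maximal palindrome is found
-- # as the common prefix of the reversed left part and the right part.
-- def _common(u, v):
--     m = 0
--     for a, b in zip(u, v):
--         if a != b:
--             break
--         m += 1
--     return m
--
-- def get_unique_palindromes(s):
--     n = len(s)
--     result = []
--     for t in range(2 * n - 1):
--         l = t // 2
--         r = (t + 1) // 2
--         m = _common(s[:l + 1][::-1], s[r:])
--         if r - l + 2 * m - 1 >= 2:
--             result.append(s[l - m + 1:r + m])
--     return result
-- ===== Notes on version B (the rewrite author's own statement) =====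
-- stated objective: alternative
-- what changed: B replaces A's per-index pair of two-pointer expansion helper calls by a single loop over the 2n-1 palindrome centers, computing each maximal palindrome as the common prefix length of the reversed left part and the right part (zip-and-count), then slicing; no expand helper and no index-pair bookkeeping.
import Mathlib
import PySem

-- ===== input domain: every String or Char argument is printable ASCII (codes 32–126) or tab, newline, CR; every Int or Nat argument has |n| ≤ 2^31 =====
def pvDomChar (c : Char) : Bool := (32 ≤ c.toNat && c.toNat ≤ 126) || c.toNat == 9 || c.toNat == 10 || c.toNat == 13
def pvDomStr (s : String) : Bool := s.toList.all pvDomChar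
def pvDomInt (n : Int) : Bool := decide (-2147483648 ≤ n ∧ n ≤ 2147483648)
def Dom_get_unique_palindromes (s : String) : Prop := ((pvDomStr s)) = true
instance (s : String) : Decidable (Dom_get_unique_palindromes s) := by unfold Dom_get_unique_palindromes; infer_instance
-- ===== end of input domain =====

-- B replaces A's per-index pair of two-pointer expansion loops by one pass over the 2n-1
-- palindrome centers, finding each maximal palindrome as the common prefix of the
-- reversed left part and the right part (objective: alternative decomposition).

-- ===== PORT A =====
-- while left >= 0 and right < len_s and s[left] == s[right]: left -= 1; right += 1
def pvExpand (cs : List Char) (left right : Int) : Int × Int :=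
  if h : 0 ≤ left ∧ right < (cs.length : Int) ∧
      PySem.List.pyGet? cs left = PySem.List.pyGet? cs right then
    pvExpand cs (left - 1) (right + 1)
  else
    (left + 1, right - 1)
termination_by ((cs.length : Int) - right).toNat
decreasing_by omega

def get_unique_palindromes (s : String) : List String :=
  let cs := s.toList
  let len_s : Int := cs.length
  (PySem.List.pyRange 0 len_s).foldl (fun result i =>
    let p1 := pvExpand cs i i
    let p2 := pvExpand cs i (i + 1)
    let result := if p1.1 ≠ p1.2 then
        result ++ [String.ofList (PySem.List.slice cs (some p1.1) (some (p1.2 + 1)))]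
      else result
    if p2.1 < p2.2 then
        result ++ [String.ofList (PySem.List.slice cs (some p2.1) (some (p2.2 + 1)))]
      else result) []

-- ===== PORT B =====
-- for a, b in zip(u, v): if a != b: break; m += 1
def pvCommon : List (Char × Char) → Int
  | [] => 0
  | (a, b) :: rest => if a ≠ b then 0 else pvCommon rest + 1

def get_unique_palindromes_alt (s : String) : List String :=
  let cs := s.toList
  let n : Int := cs.length
  (PySem.List.pyRange 0 (2 * n - 1)).foldl (fun result t =>
    let l := PySem.Int.floordiv t 2
    let r := PySem.Int.floordiv (t + 1) 2
    let m := pvCommon (((PySem.List.slice cs none (some (l + 1))).reverse).zip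
                        (PySem.List.slice cs (some r) none))
    if r - l + 2 * m - 1 ≥ 2 then
      result ++ [String.ofList (PySem.List.slice cs (some (l - m + 1)) (some (r + m)))]
    else result) []

-- ===== PRECONDITION & SPEC =====
def Spec_get_unique_palindromes (s : String) (out : List String) : Prop := out = get_unique_palindromes_alt s
instance (s : String) (out : List String) : Decidable (Spec_get_unique_palindromes s out) := by unfold Spec_get_unique_palindromes; infer_instance

-- ===== CLAIM (what is proved, stated in full; the proofs are below) =====
def Claim_equal_get_unique_palindromes : Prop := ∀ (s : String), Dom_get_unique_palindromes s → Spec_get_unique_palindromes s (get_unique_palindromes s)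

-- ===== LEMMAS AND PROOFS =====

-- common-prefix length of the reversed prefix ending at l and the suffix starting at r
def pvCm (cs : List Char) (l r : Int) : Int :=
  pvCommon (((cs.take (l + 1).toNat).reverse).zip (cs.drop r.toNat))

-- what A's loop body appends for index i
def pvGA (cs : List Char) (i : Int) : List String :=
  (if (pvExpand cs i i).1 ≠ (pvExpand cs i i).2 then
     [String.ofList (PySem.List.slice cs (some (pvExpand cs i i).1)
        (some ((pvExpand cs i i).2 + 1)))] else [])
  ++ (if (pvExpand cs i (i + 1)).1 < (pvExpand cs i (i + 1)).2 then
     [String.ofList (PySem.List.slice cs (some (pvExpand cs i (i + 1)).1)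
        (some ((pvExpand cs i (i + 1)).2 + 1)))] else [])

-- what B's loop body appends for center t
def pvGB (cs : List Char) (t : Int) : List String :=
  let l := PySem.Int.floordiv t 2
  let r := PySem.Int.floordiv (t + 1) 2
  let m := pvCommon (((PySem.List.slice cs none (some (l + 1))).reverse).zip
                      (PySem.List.slice cs (some r) none))
  if r - l + 2 * m - 1 ≥ 2 then
    [String.ofList (PySem.List.slice cs (some (l - m + 1)) (some (r + m)))]
  else []

lemma pvCommon_nonneg (ps : List (Char × Char)) : 0 ≤ pvCommon ps := by
  induction ps with
  | nil => simp [pvCommon]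
  | cons p rest ih => obtain ⟨a, b⟩ := p; simp only [pvCommon]; split <;> omega

lemma pvCm_nonneg (cs : List Char) (l r : Int) : 0 ≤ pvCm cs l r := pvCommon_nonneg _

lemma pyGet?_toNat (cs : List Char) (l : Int) (h : 0 ≤ l) :
    PySem.List.pyGet? cs l = cs[l.toNat]? := by
  conv_lhs => rw [show l = ((l.toNat : Nat) : Int) by omega]
  rw [PySem.List.pyGet?_natCast]

lemma pvCm_cons (cs : List Char) (l r : Int) (h0 : 0 ≤ l) (hl : l < (cs.length : Int))
    (hr : 0 ≤ r) (hrl : r < (cs.length : Int)) :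
    pvCm cs l r = (if cs[l.toNat]'(by omega) ≠ cs[r.toNat]'(by omega) then 0
                   else pvCm cs (l - 1) (r + 1) + 1) := by
  have hln : l.toNat < cs.length := by omega
  have hrn : r.toNat < cs.length := by omega
  have h1 : (cs.take (l.toNat + 1)).reverse = cs[l.toNat] :: (cs.take l.toNat).reverse := by
    rw [List.take_add_one]; simp [hln]
  unfold pvCm
  rw [show (l + 1).toNat = l.toNat + 1 by omega, show (l - 1 + 1).toNat = l.toNat by omega,
    show (r + 1).toNat = r.toNat + 1 by omega, h1, List.drop_eq_getElem_cons hrn,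
    List.zip_cons_cons]
  rfl

-- A's expansion loop, characterised by the common-prefix length
lemma pvExpand_eq (cs : List Char) (l r : Int) (hl : -1 ≤ l) (hr : 0 ≤ r)
    (hlen : l < (cs.length : Int)) :
    pvExpand cs l r = (l - pvCm cs l r + 1, r + pvCm cs l r - 1) := by
  induction l, r using pvExpand.induct cs with
  | case1 l r h ih =>
    obtain ⟨h0, hrlen, heq⟩ := h
    have hm : pvCm cs l r = pvCm cs (l - 1) (r + 1) + 1 := by
      rw [pvCm_cons cs l r h0 hlen hr hrlen]
      rw [pyGet?_toNat cs l h0, pyGet?_toNat cs r hr] at heq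
      simp only [List.getElem?_eq_getElem (show l.toNat < cs.length by omega),
        List.getElem?_eq_getElem (show r.toNat < cs.length by omega),
        Option.some.injEq] at heq
      simp [heq]
    rw [pvExpand, dif_pos ⟨h0, hrlen, heq⟩, ih (by omega) (by omega) (by omega), hm]
    simp only [Prod.mk.injEq]
    omega
  | case2 l r h =>
    have hm : pvCm cs l r = 0 := by
      push Not at h
      by_cases h0 : 0 ≤ l
      · by_cases hrlen : r < (cs.length : Int)
        · have hne := h h0 hrlen
          rw [pvCm_cons cs l r h0 hlen hr hrlen]
          rw [pyGet?_toNat cs l h0, pyGet?_toNat cs r hr] at hne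
          simp only [List.getElem?_eq_getElem (show l.toNat < cs.length by omega),
            List.getElem?_eq_getElem (show r.toNat < cs.length by omega)] at hne
          rw [if_pos (by simpa using hne)]
        · unfold pvCm
          rw [List.drop_eq_nil_of_le (by omega), List.zip_nil_right]
          rfl
      · have : l = -1 := by omega
        subst this
        unfold pvCm
        norm_num
        rfl
    rw [pvExpand, dif_neg h, hm]
    simp only [Prod.mk.injEq]
    omega

-- the odd center always matches itself
lemma pvCm_center (cs : List Char) (i : Nat) (hi : i < cs.length) :
    1 ≤ pvCm cs (i : Int) (i : Int) := by
  rw [pvCm_cons cs i i (by omega) (by exact_mod_cast hi) (by omega) (by exact_mod_cast hi)]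
  simp only [ne_eq, not_true_eq_false, if_false]
  have := pvCm_nonneg cs ((i : Int) - 1) ((i : Int) + 1)
  omega

-- B's body, rewritten through floordiv values and take/drop
lemma pvGB_eq (cs : List Char) (t l r : Int) (hl : PySem.Int.floordiv t 2 = l)
    (hr : PySem.Int.floordiv (t + 1) 2 = r) (h0l : 0 ≤ l) (h0r : 0 ≤ r) :
    pvGB cs t = if r - l + 2 * pvCm cs l r - 1 ≥ 2 then
        [String.ofList (PySem.List.slice cs (some (l - pvCm cs l r + 1)) (some (r + pvCm cs l r)))]
      else [] := by
  simp only [pvGB, pvCm]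
  rw [hl, hr, PySem.List.slice_to _ (by omega : (0:Int) ≤ l + 1),
    PySem.List.slice_from _ h0r]

lemma pvGAB (cs : List Char) (i : Nat) (hi : i < cs.length) :
    pvGA cs (i : Int) = pvGB cs ((2 * i : Nat) : Int) ++ pvGB cs ((2 * i + 1 : Nat) : Int) := by
  have hm1 := pvCm_center cs i hi
  have hm2 := pvCm_nonneg cs (i : Int) ((i : Int) + 1)
  have hA1 := pvExpand_eq cs i i (by omega) (by omega) (by exact_mod_cast hi)
  have hA2 := pvExpand_eq cs i (i + 1) (by omega) (by omega) (by exact_mod_cast hi)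
  have hB1 := pvGB_eq cs ((2 * i : Nat) : Int) (i : Int) (i : Int)
    (by rw [PySem.Int.floordiv_eq_ediv_of_pos (by norm_num)]; push_cast; omega)
    (by rw [PySem.Int.floordiv_eq_ediv_of_pos (by norm_num)]; push_cast; omega)
    (by omega) (by omega)
  have hB2 := pvGB_eq cs ((2 * i + 1 : Nat) : Int) (i : Int) ((i : Int) + 1)
    (by rw [PySem.Int.floordiv_eq_ediv_of_pos (by norm_num)]; push_cast; omega)
    (by rw [PySem.Int.floordiv_eq_ediv_of_pos (by norm_num)]; omega)
    (by omega) (by omega)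
  rw [pvGA, hA1, hA2, hB1, hB2]
  congr 1
  · rw [show ((i : Int) + pvCm cs i i - 1) + 1 = (i : Int) + pvCm cs i i from by ring]
    exact if_congr (by constructor <;> (intro; omega)) rfl rfl
  · rw [show ((i : Int) + 1 + pvCm cs i ((i : Int) + 1) - 1) + 1
        = ((i : Int) + 1) + pvCm cs i ((i : Int) + 1) from by ring,
      show (i : Int) + 1 + pvCm cs (i : Int) ((i : Int) + 1) - 1
        = (i : Int) + pvCm cs (i : Int) ((i : Int) + 1) from by ring]
    exact if_congr (by constructor <;> (intro; omega)) rfl rfl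

-- the rightmost even center contributes nothing
lemma pvGB_last (cs : List Char) (h1 : 1 ≤ cs.length) :
    pvGB cs ((2 * cs.length - 1 : Nat) : Int) = [] := by
  have hB := pvGB_eq cs ((2 * cs.length - 1 : Nat) : Int)
    ((cs.length : Int) - 1) (cs.length : Int)
    (by rw [PySem.Int.floordiv_eq_ediv_of_pos (by norm_num)]; omega)
    (by rw [PySem.Int.floordiv_eq_ediv_of_pos (by norm_num)]; omega)
    (by omega) (by omega)
  have hm : pvCm cs ((cs.length : Int) - 1) (cs.length : Int) = 0 := by
    unfold pvCm
    rw [List.drop_eq_nil_of_le (by omega), List.zip_nil_right]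
    rfl
  rw [hB, hm]
  norm_num

lemma pvFoldA (s : String) :
    get_unique_palindromes s
      = (PySem.List.pyRange 0 (s.toList.length : Int)).flatMap (pvGA s.toList) := by
  unfold get_unique_palindromes
  rw [PySem.List.foldl_congr_mem _ _ (fun acc x => acc ++ pvGA s.toList x) _
    (by intro acc x _; dsimp only; simp only [pvGA]
        split_ifs with h1 h2 h2 <;> simp [List.append_assoc])]
  rw [PySem.List.foldl_append_eq_flatMap]
  rfl

lemma pvFoldB (s : String) :
    get_unique_palindromes_alt s
      = (PySem.List.pyRange 0 (2 * (s.toList.length : Int) - 1)).flatMap (pvGB s.toList) := by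
  unfold get_unique_palindromes_alt
  rw [PySem.List.foldl_congr_mem _ _ (fun acc x => acc ++ pvGB s.toList x) _
    (by intro acc x _; dsimp only; simp only [pvGB]
        split_ifs with h1 <;> simp)]
  rw [PySem.List.foldl_append_eq_flatMap]
  rfl

-- interleaving the 2n centers back into n pairs
lemma pvRange_pair (g : Nat → List String) (n : Nat) :
    (List.range (2 * n)).flatMap g
      = (List.range n).flatMap (fun i => g (2 * i) ++ g (2 * i + 1)) := by
  induction n with
  | zero => simp
  | succ n ih =>
    rw [show 2 * (n + 1) = (2 * n + 1) + 1 by ring, List.range_succ, List.range_succ,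
      List.range_succ]
    simp [List.flatMap_append, ih, List.append_assoc]

-- ===== VERDICT (by name: the statement is the Claim_ definition above) =====
theorem get_unique_palindromes_spec : Claim_equal_get_unique_palindromes := by
  intro s _
  unfold Spec_get_unique_palindromes
  rw [pvFoldA, pvFoldB]
  by_cases hN : s.toList.length = 0
  · rw [hN]
    norm_num
  · have h1 : 1 ≤ s.toList.length := by omega
    rw [show (2 * (s.toList.length : Int) - 1) = ((2 * s.toList.length - 1 : Nat) : Int) by
      omega]
    rw [PySem.List.pyRange_zero_natCast, PySem.List.pyRange_zero_natCast,
      List.flatMap_map, List.flatMap_map]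
    have e1 : (List.range (2 * s.toList.length - 1)).flatMap (fun k : Nat => pvGB s.toList (k : Int))
        = (List.range (2 * s.toList.length)).flatMap (fun k : Nat => pvGB s.toList (k : Int)) := by
      conv_rhs => rw [show 2 * s.toList.length = (2 * s.toList.length - 1) + 1 by omega]
      rw [List.range_succ, List.flatMap_append, List.flatMap_cons, List.flatMap_nil,
        pvGB_last s.toList h1]
      simp
    rw [e1, pvRange_pair (fun k : Nat => pvGB s.toList (k : Int)) s.toList.length,
      List.flatMap_def, List.flatMap_def]
    exact congrArg List.flatten (List.map_congr_left (fun i hi =>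
      pvGAB s.toList i (List.mem_range.mp hi)))
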